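-- pv_equiv track=rewrite | github.com/raddduu/Double-Double-Dominoes---Object-Detection | solution.py | get_two_highest_values
-- ===== SOURCE A (Python) =====
-- def get_two_highest_values(patches):
--     first_highest_value = 0
--     second_highest_value = 0
--     first_highest_patch = None
--     second_highest_patch = None
--     for patch in patches:
--         if patch[3] > first_highest_value:
--             second_highest_value = first_highest_value
--             second_highest_patch = first_highest_patch
--             first_highest_value = patch[3]
--             first_highest_patch = patch
--         elif patch[3] > second_highest_value:
--             second_highest_value = patch[3]
--             second_highest_patch = patch
--
--     return first_highest_patch, second_highest_patch
-- ===== SOURCE B (Python) =====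
-- def get_two_highest_values(patches):
--     top = sorted([p for p in patches if p[3] > 0], key=lambda p: p[3], reverse=True)[:2]
--     first = top[0] if len(top) > 0 else None
--     second = top[1] if len(top) > 1 else None
--     return first, second
-- ===== Notes on version B (the rewrite author's own statement) =====
-- stated objective: alternative
-- what changed: Replaces the running two-register selection loop with filter-positives, stable descending sort by patch[3], then take the first two (padding with None).
import Mathlib
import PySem

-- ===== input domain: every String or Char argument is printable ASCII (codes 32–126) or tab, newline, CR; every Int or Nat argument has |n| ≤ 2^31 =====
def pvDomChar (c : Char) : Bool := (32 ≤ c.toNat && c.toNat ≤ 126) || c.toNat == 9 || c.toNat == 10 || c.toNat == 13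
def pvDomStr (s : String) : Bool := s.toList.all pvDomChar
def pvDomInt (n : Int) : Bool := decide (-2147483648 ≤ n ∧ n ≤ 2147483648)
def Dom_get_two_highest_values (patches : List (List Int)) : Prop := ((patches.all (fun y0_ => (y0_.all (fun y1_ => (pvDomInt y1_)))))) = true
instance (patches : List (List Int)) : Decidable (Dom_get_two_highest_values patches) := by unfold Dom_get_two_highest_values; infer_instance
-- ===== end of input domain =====

-- B replaces A's running two-register selection loop with: filter the patches with positive
-- patch[3], stably sort them by patch[3] descending, and take the first two (padded with none).

-- ===== PORT A =====
-- state = (first_highest_value, second_highest_value, first_highest_patch, second_highest_patch)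
def get_two_highest_values (patches : List (List Int)) : Option (List Int) × Option (List Int) :=
  let s := patches.foldl
    (fun (st : Int × Int × Option (List Int) × Option (List Int)) patch =>
      if PySem.List.pyGetD patch 3 0 > st.1 then
        (PySem.List.pyGetD patch 3 0, st.1, some patch, st.2.2.1)
      else if PySem.List.pyGetD patch 3 0 > st.2.1 then
        (st.1, PySem.List.pyGetD patch 3 0, st.2.2.1, some patch)
      else st)
    (0, 0, none, none)
  (s.2.2.1, s.2.2.2)

-- ===== PORT B =====
def get_two_highest_values_alt (patches : List (List Int)) : Option (List Int) × Option (List Int) :=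
  let top := (PySem.List.sorted (patches.filter (fun p => PySem.List.pyGetD p 3 0 > 0))
      (fun p => PySem.List.pyGetD p 3 0) true).take 2
  (top[0]?, top[1]?)

-- ===== PRECONDITION & SPEC =====
-- Pre_ excludes exactly the inputs on which Python's patch[3] raises IndexError (a patch shorter than 4).
def Pre_get_two_highest_values (patches : List (List Int)) : Prop :=
  ∀ p ∈ patches, PySem.Raise.InRange p.length 3
instance (patches : List (List Int)) : Decidable (Pre_get_two_highest_values patches) := by
  unfold Pre_get_two_highest_values; infer_instance
def pvWitness_get_two_highest_values : List (List Int) := [[1, 2, 3, 4], [5, 6, 7, 8], [0, 0, 0, 8]]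

def Spec_get_two_highest_values (patches : List (List Int)) (out : Option (List Int) × Option (List Int)) : Prop := out = get_two_highest_values_alt patches
instance (patches : List (List Int)) (out : Option (List Int) × Option (List Int)) : Decidable (Spec_get_two_highest_values patches out) := by unfold Spec_get_two_highest_values; infer_instance

-- ===== CLAIM (what is proved, stated in full; the proofs are below) =====
def Claim_equal_get_two_highest_values : Prop := ∀ (patches : List (List Int)), Dom_get_two_highest_values patches → Pre_get_two_highest_values patches → Spec_get_two_highest_values patches (get_two_highest_values patches)

-- ===== LEMMAS AND PROOFS =====

-- the key Python A and B select by
def pvKey (p : List Int) : Int := PySem.List.pyGetD p 3 0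

-- A's loop body, named for the proofs
def pvStep (st : Int × Int × Option (List Int) × Option (List Int)) (patch : List Int) :
    Int × Int × Option (List Int) × Option (List Int) :=
  if pvKey patch > st.1 then (pvKey patch, st.1, some patch, st.2.2.1)
  else if pvKey patch > st.2.1 then (st.1, pvKey patch, st.2.2.1, some patch)
  else st

def pvKv : Option (List Int) → Int
  | none => 0
  | some p => pvKey p

-- the loop state determined by the (sorted) list of selected patches
def pvStateOf (L : List (List Int)) : Int × Int × Option (List Int) × Option (List Int) :=
  (pvKv L[0]?, pvKv L[1]?, L[0]?, L[1]?)

def pvBefore (a b : List Int) : Bool := decide (pvKey b < pvKey a)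

lemma pvStep_insert (L : List (List Int)) (x : List Int) (hpos : ∀ p ∈ L, 0 < pvKey p) :
    pvStep (pvStateOf L) x
      = pvStateOf (if 0 < pvKey x then PySem.List.insertBy pvBefore x L else L) := by
  match L with
  | [] =>
      by_cases hx : 0 < pvKey x <;>
        simp [pvStep, pvStateOf, PySem.List.insertBy, pvKv, hx]
  | [a] =>
      have ha := hpos a (by simp)
      by_cases h1 : pvKey a < pvKey x
      · simp [pvStep, pvStateOf, PySem.List.insertBy, pvBefore, pvKv, h1, show 0 < pvKey x by omega]
      · by_cases hx : 0 < pvKey x <;>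
          simp [pvStep, pvStateOf, PySem.List.insertBy, pvBefore, pvKv, h1, hx]
  | a :: b :: t =>
      have ha := hpos a (by simp)
      have hb := hpos b (by simp)
      by_cases h1 : pvKey a < pvKey x
      · simp [pvStep, pvStateOf, PySem.List.insertBy, pvBefore, pvKv, h1, show 0 < pvKey x by omega]
      · by_cases h2 : pvKey b < pvKey x
        · simp [pvStep, pvStateOf, PySem.List.insertBy, pvBefore, pvKv, h1, h2,
            show 0 < pvKey x by omega]
        · by_cases hx : 0 < pvKey x <;>
            simp [pvStep, pvStateOf, PySem.List.insertBy, pvBefore, pvKv, h1, h2, hx]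

-- running A's loop over xs lands in the state described by B's sorted filtered list
lemma pvInvariant (xs : List (List Int)) :
    xs.foldl pvStep (0, 0, none, none)
      = pvStateOf (PySem.List.sorted (xs.filter (fun p => 0 < pvKey p)) pvKey true) := by
  induction xs using List.reverseRecOn with
  | nil => simp [pvStateOf, PySem.List.sorted, pvKv]
  | append_singleton xs x ih =>
      have hpos : ∀ p ∈ PySem.List.sorted (xs.filter (fun p => 0 < pvKey p)) pvKey true,
          0 < pvKey p := by
        intro p hp
        rw [PySem.List.mem_sorted] at hp
        exact (List.mem_filter.mp hp).2 |> of_decide_eq_true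
      rw [List.foldl_append, List.foldl_cons, List.foldl_nil, ih, pvStep_insert _ _ hpos]
      by_cases hx : 0 < pvKey x
      · simp only [PySem.List.sorted, List.filter_append, List.filter_cons, List.filter_nil, hx,
          decide_true, if_pos, List.foldl_append, List.foldl_cons, List.foldl_nil]
        rfl
      · simp [PySem.List.sorted, List.filter_append, hx]

-- A's fold IS the fold of pvStep
lemma pvA_eq (patches : List (List Int)) :
    get_two_highest_values patches
      = ((patches.foldl pvStep (0, 0, none, none)).2.2.1,
         (patches.foldl pvStep (0, 0, none, none)).2.2.2) := rfl

-- first two entries of the state list, as B reads them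
lemma pvStateOf_take (L : List (List Int)) :
    ((pvStateOf L).2.2.1, (pvStateOf L).2.2.2) = ((L.take 2)[0]?, (L.take 2)[1]?) := by
  match L with
  | [] => rfl
  | [a] => rfl
  | a :: b :: t => rfl

-- ===== VERDICT (by name: the statement is the Claim_ definition above) =====
theorem get_two_highest_values_spec : Claim_equal_get_two_highest_values := by
  intro patches _ _
  show _ = _
  rw [pvA_eq, pvInvariant, pvStateOf_take]
  rfl
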